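-- pv_equiv track=rewrite | github.com/drewstone/dynamic-governance | gov.py | hash_cap_squared_selection
-- ===== SOURCE A (Python) =====
-- def hash_cap_squared_selection(reports, hashes):
--     max_cap = 0
--     max_obj = 0
--     for i in range(len(reports)):
--         capacity = reports[i]
--         summed_hashpower = sum([
--             hashes[j] for j in range(len(reports)) if reports[j] >= capacity
--         ])
--
--         if summed_hashpower * (capacity ** 2) > max_obj:
--             max_cap = capacity
--             max_obj = summed_hashpower * (capacity ** 2)
--
--     return max_cap, None
-- ===== SOURCE B (Python) =====
-- def hash_cap_squared_selection(reports, hashes):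
--     # Sort the (report, hash) pairs by capacity descending; a running prefix sum
--     # then yields, for each distinct capacity r, the total hashpower of all
--     # reports >= r in one pass.  Selection runs over the original order with
--     # O(1) lookups instead of an inner O(n) scan.
--     summed = {}
--     acc = 0
--     for r, h in sorted(zip(reports, hashes), key=lambda p: p[0], reverse=True):
--         acc += h
--         summed[r] = acc
--     max_cap = 0
--     max_obj = 0
--     for c in reports:
--         obj = summed.get(c, 0) * c * c
--         if obj > max_obj:
--             max_cap = c
--             max_obj = obj
--     return max_cap, None
-- ===== Notes on version B (the rewrite author's own statement) =====
-- stated objective: faster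
-- what changed: A recomputes the summed hashpower with a full inner scan for every report; B sorts the (report, hash) pairs by capacity descending once, builds a capacity->summed-hashpower dict from a running prefix sum, and the selection loop over the original order does O(1) lookups.
import Mathlib
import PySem

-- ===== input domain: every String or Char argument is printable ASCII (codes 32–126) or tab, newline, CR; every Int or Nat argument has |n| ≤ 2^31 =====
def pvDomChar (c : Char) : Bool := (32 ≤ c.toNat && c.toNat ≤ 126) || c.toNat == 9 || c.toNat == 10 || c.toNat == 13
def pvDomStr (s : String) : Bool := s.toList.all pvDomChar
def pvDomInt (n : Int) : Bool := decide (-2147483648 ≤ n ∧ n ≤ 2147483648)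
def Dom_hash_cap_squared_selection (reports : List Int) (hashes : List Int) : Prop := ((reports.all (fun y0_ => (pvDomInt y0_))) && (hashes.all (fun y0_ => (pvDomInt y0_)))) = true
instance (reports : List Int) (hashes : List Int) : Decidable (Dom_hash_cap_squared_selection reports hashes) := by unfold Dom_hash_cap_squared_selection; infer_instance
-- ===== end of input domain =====

-- B replaces A's quadratic inner rescan by one descending sort with prefix sums, keeping the
-- original-order selection loop: an O(n log n) alternative to A's O(n^2).


-- ===== PORT A =====
def hash_cap_squared_selection (reports : List Int) (hashes : List Int) : Option Int × Option Int :=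
  let st := (PySem.List.pyRange 0 reports.length 1).foldl (fun (st : Int × Int) i =>
    let capacity := PySem.List.pyGetD reports i 0
    let summed_hashpower :=
      (((PySem.List.pyRange 0 reports.length 1).filter
          (fun j => decide (capacity ≤ PySem.List.pyGetD reports j 0))).map
        (fun j => PySem.List.pyGetD hashes j 0)).sum
    if st.2 < summed_hashpower * capacity ^ 2 then (capacity, summed_hashpower * capacity ^ 2)
    else st) (0, 0)
  (some st.1, none)

-- ===== PORT B =====
-- the first loop of Source B: running prefix sum acc, dict entry overwritten at each pair
def pvBuild : List (Int × Int) → Int → PySem.Dict Int Int → PySem.Dict Int Int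
  | [], _, d => d
  | (r, h) :: ps, acc, d => pvBuild ps (acc + h) (d.insert r (acc + h))

def hash_cap_squared_selection_alt (reports : List Int) (hashes : List Int) : Option Int × Option Int :=
  let summed := pvBuild (PySem.List.sorted (reports.zip hashes) (fun p => p.1) true) 0 PySem.Dict.empty
  let st := reports.foldl (fun (st : Int × Int) c =>
    let obj := summed.getD c 0 * c * c
    if st.2 < obj then (c, obj) else st) (0, 0)
  (some st.1, none)

-- ===== PRECONDITION & SPEC =====
-- Pre_ excludes exactly the inputs where A raises IndexError: len(reports) > len(hashes)
-- (A indexes hashes[i] for every i < len(reports)).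
def Pre_hash_cap_squared_selection (reports : List Int) (hashes : List Int) : Prop :=
  reports.length ≤ hashes.length
instance (reports : List Int) (hashes : List Int) : Decidable (Pre_hash_cap_squared_selection reports hashes) := by unfold Pre_hash_cap_squared_selection; infer_instance
def pvWitness_hash_cap_squared_selection : List Int × List Int := ([2, 3, 1], [5, 4, 6])

def Spec_hash_cap_squared_selection (reports : List Int) (hashes : List Int) (out : Option Int × Option Int) : Prop := out = hash_cap_squared_selection_alt reports hashes
instance (reports : List Int) (hashes : List Int) (out : Option Int × Option Int) : Decidable (Spec_hash_cap_squared_selection reports hashes out) := by unfold Spec_hash_cap_squared_selection; infer_instance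

-- ===== CLAIM (what is proved, stated in full; the proofs are below) =====
def Claim_equal_hash_cap_squared_selection : Prop := ∀ (reports : List Int) (hashes : List Int), Dom_hash_cap_squared_selection reports hashes → Pre_hash_cap_squared_selection reports hashes → Spec_hash_cap_squared_selection reports hashes (hash_cap_squared_selection reports hashes)

-- ===== LEMMAS AND PROOFS =====

-- A's inner sum over indices equals the zip-pair sum, given enough hashes.
theorem pv_sumA_aux : ∀ (rs hs : List Int), rs.length ≤ hs.length → ∀ c : Int,
    (((List.range rs.length).filter (fun k => decide (c ≤ rs.getD k 0))).map
      (fun k => hs.getD k 0)).sum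
    = (((rs.zip hs).filter (fun p => decide (c ≤ p.1))).map Prod.snd).sum := by
  intro rs
  induction rs with
  | nil => intro hs _ c; simp
  | cons r rs ih =>
    intro hs hlen c
    cases hs with
    | nil => simp at hlen
    | cons h hs =>
      have hlen' : rs.length ≤ hs.length := by simpa using hlen
      by_cases hcr : c ≤ r
      · simp only [List.length_cons, List.range_succ_eq_map, List.filter_cons,
          List.getD_cons_zero, List.zip_cons_cons, hcr, decide_true, if_true,
          List.filter_map, List.map_map, Function.comp_def, Nat.succ_eq_add_one,
          List.getD_cons_succ, List.map_cons, List.sum_cons]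
        rw [ih hs hlen' c]
      · simp only [List.length_cons, List.range_succ_eq_map, List.filter_cons,
          List.getD_cons_zero, List.zip_cons_cons, hcr, decide_false,
          Bool.false_eq_true, if_false, List.filter_map, List.map_map,
          Function.comp_def, Nat.succ_eq_add_one, List.getD_cons_succ]
        exact ih hs hlen' c

-- A's inner sum over indices equals the zip-pair sum, given enough hashes.
theorem pv_sumA (reports hashes : List Int) (c : Int)
    (h : reports.length ≤ hashes.length) :
    (((PySem.List.pyRange 0 reports.length 1).filter
        (fun j => decide (c ≤ PySem.List.pyGetD reports j 0))).map
      (fun j => PySem.List.pyGetD hashes j 0)).sum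
    = (((reports.zip hashes).filter (fun p => decide (c ≤ p.1))).map Prod.snd).sum := by
  rw [PySem.List.pyRange_zero_nat, List.filter_map, List.map_map]
  simp only [Function.comp_def, PySem.List.pyGetD_natCast]
  exact pv_sumA_aux reports hashes h c

-- dict lookup after pvBuild on a descending-by-fst list: the prefix sum at the last
-- occurrence of key c is acc plus the total of all pairs with fst ≥ c.
theorem pv_build_get_not_mem (ps : List (Int × Int)) (acc : Int) (d : PySem.Dict Int Int)
    (c : Int) (hc : c ∉ ps.map Prod.fst) :
    (pvBuild ps acc d).get? c = d.get? c := by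
  induction ps generalizing acc d with
  | nil => rfl
  | cons p ps ih =>
    obtain ⟨r, h⟩ := p
    simp only [List.map_cons, List.mem_cons, not_or] at hc
    rw [pvBuild, ih (acc + h) _ hc.2, PySem.Dict.get?_insert_of_ne d _ hc.1]

theorem pv_build_get (ps : List (Int × Int))
    (hp : ps.Pairwise (fun a b => b.1 ≤ a.1)) (acc : Int) (d : PySem.Dict Int Int)
    (c : Int) (hc : c ∈ ps.map Prod.fst) :
    (pvBuild ps acc d).get? c
      = some (acc + ((ps.filter (fun p => decide (c ≤ p.1))).map Prod.snd).sum) := by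
  induction ps generalizing acc d with
  | nil => simp at hc
  | cons p ps ih =>
    obtain ⟨r, h⟩ := p
    rw [List.pairwise_cons] at hp
    rw [pvBuild]
    by_cases hmem : c ∈ ps.map Prod.fst
    · have hcr : c ≤ r := by
        obtain ⟨q, hq, hq1⟩ := List.mem_map.1 hmem
        have := hp.1 q hq
        omega
      rw [ih hp.2 (acc + h) _ hmem]
      simp only [List.filter_cons, hcr, decide_true, if_true, List.map_cons,
        List.sum_cons]
      congr 1
      ring
    · have hcreq : c = r := by
        simp only [List.map_cons, List.mem_cons] at hc
        tauto
      subst hcreq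
      rw [pv_build_get_not_mem ps (acc + h) _ c hmem,
        PySem.Dict.get?_insert_self]
      have hnil : ps.filter (fun p => decide (c ≤ p.1)) = [] := by
        rw [List.filter_eq_nil_iff]
        intro q hq
        have h1 := hp.1 q hq
        have h2 : q.1 ≠ c := fun he => hmem (List.mem_map.2 ⟨q, hq, he⟩)
        simp only [decide_eq_true_eq]
        omega
      simp [hnil]

-- B's dict lookup for any c occurring in reports.
theorem pv_lookup (reports hashes : List Int) (c : Int)
    (h : reports.length ≤ hashes.length) (hc : c ∈ reports) :
    (pvBuild (PySem.List.sorted (reports.zip hashes) (fun p => p.1) true) 0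
        PySem.Dict.empty).getD c 0
    = (((reports.zip hashes).filter (fun p => decide (c ≤ p.1))).map Prod.snd).sum := by
  have hperm := PySem.List.sorted_perm (reports.zip hashes) (fun p => p.1) true
  have hpw := PySem.List.sorted_pairwise_rev (reports.zip hashes) (fun p => p.1)
  have hcmem : c ∈ (PySem.List.sorted (reports.zip hashes) (fun p => p.1) true).map Prod.fst := by
    rw [(hperm.map Prod.fst).mem_iff, List.map_fst_zip h]
    exact hc
  rw [PySem.Dict.getD, pv_build_get _ hpw 0 _ c hcmem]
  simpa using
    ((hperm.filter (fun p => decide (c ≤ p.1))).map Prod.snd).sum_eq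

-- ===== VERDICT (by name: the statement is the Claim_ definition above) =====
theorem hash_cap_squared_selection_spec : Claim_equal_hash_cap_squared_selection := by
  intro reports hashes _ hpre
  unfold Spec_hash_cap_squared_selection
  simp only [hash_cap_squared_selection, hash_cap_squared_selection_alt]
  have hfold := PySem.List.foldl_pyRange_zero_pyGetD' reports 0
    (fun (st : Int × Int) capacity =>
      if st.2 < (((PySem.List.pyRange 0 reports.length 1).filter
            (fun j => decide (capacity ≤ PySem.List.pyGetD reports j 0))).map
          (fun j => PySem.List.pyGetD hashes j 0)).sum * capacity ^ 2
      then (capacity,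
        (((PySem.List.pyRange 0 reports.length 1).filter
            (fun j => decide (capacity ≤ PySem.List.pyGetD reports j 0))).map
          (fun j => PySem.List.pyGetD hashes j 0)).sum * capacity ^ 2)
      else st) (0, 0)
  rw [hfold]
  have hbody := PySem.List.foldl_congr_mem reports
    (fun (st : Int × Int) capacity =>
      if st.2 < (((PySem.List.pyRange 0 reports.length 1).filter
            (fun j => decide (capacity ≤ PySem.List.pyGetD reports j 0))).map
          (fun j => PySem.List.pyGetD hashes j 0)).sum * capacity ^ 2
      then (capacity,
        (((PySem.List.pyRange 0 reports.length 1).filter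
            (fun j => decide (capacity ≤ PySem.List.pyGetD reports j 0))).map
          (fun j => PySem.List.pyGetD hashes j 0)).sum * capacity ^ 2)
      else st)
    (fun (st : Int × Int) c =>
      if st.2 < (pvBuild (PySem.List.sorted (reports.zip hashes) (fun p => p.1) true) 0
            PySem.Dict.empty).getD c 0 * c * c
      then (c, (pvBuild (PySem.List.sorted (reports.zip hashes) (fun p => p.1) true) 0
            PySem.Dict.empty).getD c 0 * c * c)
      else st)
    (0, 0)
    (fun st c hcmem => by
      have hX : (((PySem.List.pyRange 0 reports.length 1).filter
            (fun j => decide (c ≤ PySem.List.pyGetD reports j 0))).map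
          (fun j => PySem.List.pyGetD hashes j 0)).sum * c ^ 2
          = (pvBuild (PySem.List.sorted (reports.zip hashes) (fun p => p.1) true) 0
              PySem.Dict.empty).getD c 0 * c * c := by
        rw [pv_sumA reports hashes c hpre, pv_lookup reports hashes c hpre hcmem]
        ring
      beta_reduce
      rw [hX])
  rw [hbody]
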